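-- pv_equiv track=rewrite | github.com/nexifyai-dev/studienkolleg-aachen | backend/services/document_analysis.py | classify_overall_document_set
-- ===== SOURCE A (Python) =====
-- from typing import Any
--
-- def classify_overall_document_set(document_analyses: list[dict[str, Any]]) -> str:
--     categories = {item.get("category") for item in document_analyses}
--     if "critical" in categories:
--         return "critical"
--     if "manual_review_required" in categories:
--         return "manual_review_required"
--     if "unclear" in categories:
--         return "unclear"
--     if categories and categories.issubset({"technically_verified"}):
--         return "technically_verified"
--     if categories:
--         return "plausible"
--     return "manual_review_required"
-- ===== SOURCE B (Python) =====
-- _RANK = {"critical": 0, "manual_review_required": 1, "unclear": 2, "technically_verified": 4}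
-- _RESULT = ["critical", "manual_review_required", "unclear", "plausible",
--            "technically_verified", "manual_review_required"]
--
-- def classify_overall_document_set(document_analyses: list[dict]) -> str:
--     m = min((_RANK.get(item.get("category"), 3) for item in document_analyses), default=5)
--     return _RESULT[m]
-- ===== Notes on version B (the rewrite author's own statement) =====
-- stated objective: alternative
-- what changed: Replaces the set-of-categories plus membership/issubset priority cascade by a numeric reduction: each category is mapped to a priority rank via a dict, the minimum rank over the list (default 5 on empty input) is taken, and the answer is read off a fixed result table indexed by that minimum.
import Mathlib
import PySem

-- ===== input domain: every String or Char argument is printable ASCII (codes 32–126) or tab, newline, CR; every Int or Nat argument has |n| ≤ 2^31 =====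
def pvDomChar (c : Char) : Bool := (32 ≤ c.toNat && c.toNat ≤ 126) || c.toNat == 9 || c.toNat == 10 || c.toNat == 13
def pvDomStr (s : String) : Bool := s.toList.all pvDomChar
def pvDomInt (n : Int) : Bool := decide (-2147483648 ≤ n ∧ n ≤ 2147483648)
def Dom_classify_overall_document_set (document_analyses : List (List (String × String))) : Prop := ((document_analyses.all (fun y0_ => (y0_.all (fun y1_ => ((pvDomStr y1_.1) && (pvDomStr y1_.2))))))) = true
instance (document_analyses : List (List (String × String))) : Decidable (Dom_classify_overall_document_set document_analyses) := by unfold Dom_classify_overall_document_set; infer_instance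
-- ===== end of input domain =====

-- B replaces A's set of categories and membership/issubset cascade by a numeric reduction:
-- a dict maps each category to a priority rank, min over the list picks the dominant rank,
-- and a fixed table indexed by that minimum yields the answer (objective: alternative).

-- ===== PORT A =====
-- item.get("category"): first-match lookup in the association list (Python dict keys are unique)
def catGet (item : List (String × String)) : Option String :=
  (item.find? (fun p => p.1 == "category")).map (·.2)

-- categories = {item.get("category") for item in document_analyses}  (a set of Option String;
-- a missing "category" key contributes none = Python's None)
def classify_overall_document_set (document_analyses : List (List (String × String))) : String :=
  let categories : PySem.Set (Option String) :=
    PySem.Set.ofList (document_analyses.map (fun item => catGet item))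
  if categories.contains (some "critical") then "critical"
  else if categories.contains (some "manual_review_required") then "manual_review_required"
  else if categories.contains (some "unclear") then "unclear"
  else if !categories.isEmpty && PySem.Set.issubset categories [some "technically_verified"] then "technically_verified"
  else if !categories.isEmpty then "plausible"
  else "manual_review_required"

-- ===== PORT B =====
-- _RANK = {"critical": 0, "manual_review_required": 1, "unclear": 2, "technically_verified": 4}
-- the dict literal (keys distinct, so Dict.mk of the pair list is exactly the Python dict)
def rankDict : PySem.Dict String Nat :=
  PySem.Dict.mk [("critical", 0), ("manual_review_required", 1), ("unclear", 2), ("technically_verified", 4)]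

-- _RANK.get(item.get("category"), 3): a missing "category" key (None) never matches a str key → 3
def rankOf (item : List (String × String)) : Nat :=
  match catGet item with
  | some s => rankDict.getD s 3
  | none => 3

-- _RESULT
def resultTbl : List String :=
  ["critical", "manual_review_required", "unclear", "plausible", "technically_verified", "manual_review_required"]

-- min(generator, default=5) = left fold of min starting from 5 (every rank is ≤ 4, so the 5 is
-- exactly Python's empty default); _RESULT[m] → getD: exact since 0 ≤ m ≤ 5 < 6 always.
def classify_overall_document_set_alt (document_analyses : List (List (String × String))) : String :=
  let m := (document_analyses.map rankOf).foldl min 5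
  resultTbl.getD m "manual_review_required"

-- ===== PRECONDITION & SPEC =====
def Spec_classify_overall_document_set (document_analyses : List (List (String × String))) (out : String) : Prop := out = classify_overall_document_set_alt document_analyses
instance (document_analyses : List (List (String × String))) (out : String) : Decidable (Spec_classify_overall_document_set document_analyses out) := by unfold Spec_classify_overall_document_set; infer_instance

-- ===== CLAIM (what is proved, stated in full; the proofs are below) =====
def Claim_equal_classify_overall_document_set : Prop := ∀ (document_analyses : List (List (String × String))), Dom_classify_overall_document_set document_analyses → Spec_classify_overall_document_set document_analyses (classify_overall_document_set document_analyses)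

-- ===== LEMMAS AND PROOFS =====

-- rankOf written out over the four known categories
theorem rankOf_eq (item : List (String × String)) :
    rankOf item =
      (if catGet item = some "critical" then 0
       else if catGet item = some "manual_review_required" then 1
       else if catGet item = some "unclear" then 2
       else if catGet item = some "technically_verified" then 4
       else 3) := by
  unfold rankOf
  cases h : catGet item with
  | none => simp
  | some s =>
    simp only [Option.some.injEq]
    by_cases h1 : s = "critical"
    · subst h1; decide
    · by_cases h2 : s = "manual_review_required"
      · subst h2; decide
      · by_cases h3 : s = "unclear"
        · subst h3; decide
        · by_cases h4 : s = "technically_verified"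
          · subst h4; decide
          · simp only [h1, h2, h3, h4, if_false]
            simp [rankDict, PySem.Dict.getD_eq_get?_getD, PySem.Dict.get?_mk_cons,
              PySem.Dict.get?, Ne.symm h1, Ne.symm h2, Ne.symm h3, Ne.symm h4]

theorem rankOf_le (item : List (String × String)) : rankOf item ≤ 5 := by
  rw [rankOf_eq]; split_ifs <;> omega

-- shifting the accumulator out of a min-fold (all accumulators here stay ≤ 5)
theorem foldl_min_shift (l : List Nat) : ∀ a : Nat, a ≤ 5 →
    l.foldl min a = Nat.min a (l.foldl min 5) := by
  induction l with
  | nil =>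
    intro a ha
    simp only [List.foldl, Nat.min_def]
    split_ifs <;> omega
  | cons x l ih =>
    intro a ha
    have h1 := ih (Nat.min a x) (by simp only [Nat.min_def]; split_ifs <;> omega)
    have h2 := ih (Nat.min 5 x) (by simp only [Nat.min_def]; split_ifs <;> omega)
    simp only [List.foldl] at *
    rw [h1, h2]
    simp only [Nat.min_def]
    split_ifs <;> omega

theorem set_contains_ofList (xs : List (Option String)) (v : Option String) :
    (PySem.Set.ofList xs).contains v = xs.contains v := by
  simp [pysem]

theorem set_isEmpty_ofList (xs : List (Option String)) :
    (PySem.Set.ofList xs).isEmpty = xs.isEmpty := by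
  rw [Bool.eq_iff_iff]
  simp only [List.isEmpty_iff, List.eq_nil_iff_forall_not_mem]
  simp [pysem]

theorem set_issubset_singleton (xs : List (Option String)) (v : Option String) :
    PySem.Set.issubset (PySem.Set.ofList xs) [v] = xs.all (· == v) := by
  rw [Bool.eq_iff_iff, PySem.Set.issubset_iff]
  simp [pysem]

-- the minimum rank, characterized by the priority predicates A tests
theorem min_rank_spec (docs : List (List (String × String))) :
    (docs.map rankOf).foldl min 5 =
      (let cats := docs.map catGet
       if cats.contains (some "critical") then 0
       else if cats.contains (some "manual_review_required") then 1
       else if cats.contains (some "unclear") then 2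
       else if !(cats.all (· == some "technically_verified")) then 3
       else if !cats.isEmpty then 4
       else 5) := by
  induction docs with
  | nil => simp
  | cons item rest ih =>
    simp only [List.map_cons, List.foldl_cons, List.contains_cons, List.all_cons,
      List.isEmpty_cons] at *
    rw [foldl_min_shift _ _ (le_trans (min_le_right 5 (rankOf item)) (rankOf_le item)), ih]
    by_cases hc : catGet item = some "critical"
    · simp [rankOf_eq, hc]
      try split_ifs <;> decide
    · by_cases hm : catGet item = some "manual_review_required"
      · simp [rankOf_eq, hc, hm, Ne.symm hc]
        try split_ifs <;> decide
      · by_cases hu : catGet item = some "unclear"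
        · simp [rankOf_eq, hc, hm, hu, Ne.symm hc, Ne.symm hm]
          try split_ifs <;> decide
        · by_cases ht : catGet item = some "technically_verified"
          · simp [rankOf_eq, hc, hm, hu, ht, Ne.symm hc, Ne.symm hm, Ne.symm hu]
            try split_ifs <;> decide
          · simp [rankOf_eq, hc, hm, hu, ht, Ne.symm hc, Ne.symm hm, Ne.symm hu, Ne.symm ht]
            try split_ifs <;> decide

-- ===== VERDICT (by name: the statement is the Claim_ definition above) =====
theorem classify_overall_document_set_spec : Claim_equal_classify_overall_document_set := by
  intro docs _
  unfold Spec_classify_overall_document_set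
  unfold classify_overall_document_set classify_overall_document_set_alt
  rw [min_rank_spec]
  simp only [set_contains_ofList, set_isEmpty_ofList, set_issubset_singleton]
  split_ifs <;> simp_all [resultTbl, List.isEmpty_iff] <;> tauto
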